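-- pv_equiv track=rewrite | github.com/myeongjunkim/Algorithm | 백준/Silver/1495. 기타리스트/기타리스트.py | solution
-- ===== SOURCE A (Python) =====
-- def solution(N, S, M, V):
--
--   def dp():
--     dp =  [ [False]*(M+1) for _ in range(N) ]
--
--     pre_result = [False]*(M+1)
--     pre_result[S] =True
--     for i in range(N):
--       for j in range(M+1):
--         if not pre_result[j]:
--           continue
--         if 0<=j+V[i]<=M:
--           dp[i][j+V[i]] = True
--         if 0<=j-V[i]<=M:
--           dp[i][j-V[i]] = True
--       pre_result = dp[i]
--
--     return dp
--
--   result = dp()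
--   for i in range(M, -1, -1):
--     if result[-1][i]:
--       return i
--   return -1
-- ===== SOURCE B (Python) =====
-- def solution(N, S, M, V):
--     # backward DP: f[v] = best final volume reachable from volume v before song i (-1 if none)
--     f = list(range(M + 1))          # after the last song the final volume is v itself
--     for i in range(N - 1, -1, -1):
--         g = []
--         for v in range(M + 1):
--             best = -1
--             if 0 <= v + V[i] <= M and f[v + V[i]] > best:
--                 best = f[v + V[i]]
--             if 0 <= v - V[i] <= M and f[v - V[i]] > best:
--                 best = f[v - V[i]]
--             g.append(best)
--         f = g
--     return f[S]
-- ===== Notes on version B (the rewrite author's own statement) =====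
-- stated objective: alternative
-- what changed: Replaces the forward boolean reachability table (N rows of M+1 flags) plus a final descending scan for the largest reachable volume with a backward dynamic program over the songs that stores, for each volume, the maximum final volume reachable from it, read off directly at the start volume.
-- outside the precondition, e.g. on solution(169, 0, 0, [8, 130]): A returns -1, B raises IndexError
import Mathlib
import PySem

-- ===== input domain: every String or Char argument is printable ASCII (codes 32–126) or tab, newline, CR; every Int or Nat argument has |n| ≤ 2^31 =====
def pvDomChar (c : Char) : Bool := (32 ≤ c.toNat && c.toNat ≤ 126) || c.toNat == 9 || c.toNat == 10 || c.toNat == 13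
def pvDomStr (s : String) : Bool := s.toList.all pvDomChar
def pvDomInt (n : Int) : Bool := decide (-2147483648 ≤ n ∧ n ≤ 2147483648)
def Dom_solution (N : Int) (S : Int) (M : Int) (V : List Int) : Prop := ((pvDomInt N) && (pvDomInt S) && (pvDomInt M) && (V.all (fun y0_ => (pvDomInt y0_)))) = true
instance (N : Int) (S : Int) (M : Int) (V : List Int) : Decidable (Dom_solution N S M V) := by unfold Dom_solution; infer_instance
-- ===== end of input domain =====

-- B replaces A's forward boolean reachability table plus final descending scan by a backward DP
-- storing, per volume, the best reachable final volume, read off at the start volume (objective: alternative).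

-- ===== PORT A =====
def solution (N : Int) (S : Int) (M : Int) (V : List Int) : Int :=
  -- dp = [[False]*(M+1) for _ in range(N)]
  let blank : List Bool := List.replicate (M + 1).toNat false
  let dp0 : List (List Bool) := (PySem.List.pyRange 0 N 1).map (fun _ => blank)
  -- pre_result = [False]*(M+1); pre_result[S] = True
  let pre0 : List Bool := PySem.List.pySetD blank S true
  -- for i in range(N): … (state = (dp, pre_result))
  let st := (PySem.List.pyRange 0 N 1).foldl (fun (st : List (List Bool) × List Bool) i =>
      let vi := PySem.List.pyGetD V i 0
      -- for j in range(M+1): … writes into dp[i]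
      let row := (PySem.List.pyRange 0 (M + 1) 1).foldl (fun row j =>
          if PySem.List.pyGetD st.2 j false = false then row
          else
            let row := if 0 ≤ j + vi ∧ j + vi ≤ M then PySem.List.pySetD row (j + vi) true else row
            if 0 ≤ j - vi ∧ j - vi ≤ M then PySem.List.pySetD row (j - vi) true else row)
        (PySem.List.pyGetD st.1 i [])
      (PySem.List.pySetD st.1 i row, row))
    (dp0, pre0)
  -- for i in range(M, -1, -1): if result[-1][i]: return i
  -- return -1
  (((PySem.List.pyRange M (-1) (-1)).find? (fun i =>
      PySem.List.pyGetD (PySem.List.pyGetD st.1 (-1) []) i false)).getD (-1))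

-- ===== PORT B =====
def solution_alt (N : Int) (S : Int) (M : Int) (V : List Int) : Int :=
  -- f = list(range(M+1))
  let f0 : List Int := PySem.List.pyRange 0 (M + 1) 1
  -- for i in range(N-1, -1, -1): g = []; for v in range(M+1): … g.append(best); f = g
  let f := (PySem.List.pyRange (N - 1) (-1) (-1)).foldl (fun f i =>
      let vi := PySem.List.pyGetD V i 0
      (PySem.List.pyRange 0 (M + 1) 1).foldl (fun g v =>
          let best : Int := -1
          let best := if 0 ≤ v + vi ∧ v + vi ≤ M ∧ best < PySem.List.pyGetD f (v + vi) 0 then PySem.List.pyGetD f (v + vi) 0 else best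
          let best := if 0 ≤ v - vi ∧ v - vi ≤ M ∧ best < PySem.List.pyGetD f (v - vi) 0 then PySem.List.pyGetD f (v - vi) 0 else best
          g ++ [best]) []) f0
  -- return f[S]
  PySem.List.pyGetD f S (-1)

-- ===== PRECONDITION & SPEC =====
-- A raises IndexError when N < 1 (result[-1] on the empty table) and when S is outside
-- [-(M+1), M] (pre_result[S]). Pre_ also excludes len(V) < N, where B's loop always reads V[i]
-- and raises IndexError while A, reading V[i] lazily, still returns -1 whenever the reachable
-- set dies out before the missing song index (and raises otherwise).
def Pre_solution (N : Int) (S : Int) (M : Int) (V : List Int) : Prop :=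
  1 ≤ N ∧ N ≤ (V.length : Int) ∧ -(M + 1) ≤ S ∧ S ≤ M
instance (N : Int) (S : Int) (M : Int) (V : List Int) : Decidable (Pre_solution N S M V) := by
  unfold Pre_solution; infer_instance
def pvWitness_solution : Int × Int × Int × List Int := (3, 2, 5, [1, 3, 2])
def Spec_solution (N : Int) (S : Int) (M : Int) (V : List Int) (out : Int) : Prop := out = solution_alt N S M V
instance (N : Int) (S : Int) (M : Int) (V : List Int) (out : Int) : Decidable (Spec_solution N S M V out) := by unfold Spec_solution; infer_instance

-- ===== CLAIM (what is proved, stated in full; the proofs are below) =====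
def Claim_equal_solution : Prop := ∀ (N : Int) (S : Int) (M : Int) (V : List Int), Dom_solution N S M V → Pre_solution N S M V → Spec_solution N S M V (solution N S M V)

-- ===== LEMMAS AND PROOFS =====

-- A's inner loop body (one j step writing into the current row)
def fbody (M vi : Int) (pre : List Bool) (row : List Bool) (j : Int) : List Bool :=
  if PySem.List.pyGetD pre j false = false then row
  else
    let row := if 0 ≤ j + vi ∧ j + vi ≤ M then PySem.List.pySetD row (j + vi) true else row
    if 0 ≤ j - vi ∧ j - vi ≤ M then PySem.List.pySetD row (j - vi) true else row

-- A's whole inner loop: the row of volumes reachable after one more song, from scratch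
def fstep (M vi : Int) (pre : List Bool) : List Bool :=
  (PySem.List.pyRange 0 (M + 1) 1).foldl (fbody M vi pre) (List.replicate (M + 1).toNat false)

-- A's outer loop body on the state (dp, pre_result)
def stepA (M : Int) (V : List Int) (st : List (List Bool) × List Bool) (i : Int) : List (List Bool) × List Bool :=
  let row := (PySem.List.pyRange 0 (M + 1) 1).foldl (fbody M (PySem.List.pyGetD V i 0) st.2) (PySem.List.pyGetD st.1 i [])
  (PySem.List.pySetD st.1 i row, row)

-- B's per-volume best value (one v step of B's inner loop)
def bestf (M vi : Int) (f : List Int) (v : Int) : Int :=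
  if 0 ≤ v - vi ∧ v - vi ≤ M ∧
      (if 0 ≤ v + vi ∧ v + vi ≤ M ∧ (-1 : Int) < PySem.List.pyGetD f (v + vi) 0 then PySem.List.pyGetD f (v + vi) 0 else -1)
        < PySem.List.pyGetD f (v - vi) 0
  then PySem.List.pyGetD f (v - vi) 0
  else (if 0 ≤ v + vi ∧ v + vi ≤ M ∧ (-1 : Int) < PySem.List.pyGetD f (v + vi) 0 then PySem.List.pyGetD f (v + vi) 0 else -1)

-- B's whole inner loop
def gstep (M vi : Int) (f : List Int) : List Int :=
  (PySem.List.pyRange 0 (M + 1) 1).map (bestf M vi f)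

-- maximum of F over the indices where P holds, -1 if none
def maxOver (P : List Bool) (F : List Int) : Int :=
  (List.range P.length).foldl (fun a v => if P.getD v false = true then max a (F.getD v (-1)) else a) (-1)

-- A's final descending scan
def scanDesc (M : Int) (P : List Bool) : Int :=
  ((PySem.List.pyRange M (-1) (-1)).find? (fun i => PySem.List.pyGetD P i false)).getD (-1)

lemma fbody_length (M vi : Int) (pre row : List Bool) (j : Int) :
    (fbody M vi pre row j).length = row.length := by
  unfold fbody
  split_ifs <;> simp [PySem.List.length_pySetD]

lemma frun_length (M vi : Int) (pre : List Bool) (js : List Int) :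
    ∀ row : List Bool, (js.foldl (fbody M vi pre) row).length = row.length := by
  induction js with
  | nil => intro row; rfl
  | cons j js ih => intro row; simp only [List.foldl_cons]; rw [ih, fbody_length]

lemma getD_pySetD_true (M : Int) (row : List Bool) (hrow : row.length = (M + 1).toNat)
    (t : Int) (h0 : 0 ≤ t) (ht : t ≤ M) (w : Nat) :
    ((PySem.List.pySetD row t true).getD w false = true ↔ ((w : Int) = t ∨ row.getD w false = true)) := by
  rw [PySem.List.pySetD_of_nonneg _ _ h0, List.getD_eq_getElem?_getD, List.getElem?_set,
    List.getD_eq_getElem?_getD]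
  by_cases hw : t.toNat = w
  · rw [if_pos hw, if_pos (by omega)]
    simp
    omega
  · rw [if_neg hw]
    constructor
    · intro h; exact Or.inr h
    · rintro (h | h)
      · omega
      · exact h

lemma fbody_getD (M vi a : Int) (pre row : List Bool) (hrow : row.length = (M + 1).toNat)
    (w : Nat) (hw : w < (M + 1).toNat) :
    ((fbody M vi pre row a).getD w false = true
      ↔ (row.getD w false = true ∨ (PySem.List.pyGetD pre a false = true ∧
          ((w : Int) = a + vi ∨ (w : Int) = a - vi)))) := by
  have hwM : (w : Int) ≤ M := by omega
  have hw0 : (0 : Int) ≤ (w : Int) := by omega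
  unfold fbody
  by_cases hpre : PySem.List.pyGetD pre a false = false
  · rw [if_pos hpre]
    simp [hpre]
  · have hpre' : PySem.List.pyGetD pre a false = true := by
      cases h : PySem.List.pyGetD pre a false
      · exact absurd h hpre
      · rfl
    rw [if_neg hpre]
    split_ifs with h1 h2 h2
    · rw [getD_pySetD_true M _ (by rw [PySem.List.length_pySetD]; exact hrow) _ (by omega) (by omega) w,
        getD_pySetD_true M row hrow _ (by omega) (by omega) w]
      constructor
      · rintro (h | h | h)
        · exact Or.inr ⟨hpre', Or.inr h⟩
        · exact Or.inr ⟨hpre', Or.inl h⟩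
        · exact Or.inl h
      · rintro (h | ⟨-, h | h⟩)
        · exact Or.inr (Or.inr h)
        · exact Or.inr (Or.inl h)
        · exact Or.inl h
    · rw [getD_pySetD_true M row hrow _ (by omega) (by omega) w]
      constructor
      · rintro (h | h)
        · exact Or.inr ⟨hpre', Or.inl h⟩
        · exact Or.inl h
      · rintro (h | ⟨-, h | h⟩)
        · exact Or.inr h
        · exact Or.inl h
        · exact absurd (show (0:Int) ≤ a - vi ∧ a - vi ≤ M by omega) h2
    · rw [getD_pySetD_true M row hrow _ (by omega) (by omega) w]
      constructor
      · rintro (h | h)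
        · exact Or.inr ⟨hpre', Or.inr h⟩
        · exact Or.inl h
      · rintro (h | ⟨-, h | h⟩)
        · exact Or.inr h
        · exact absurd (show (0:Int) ≤ a + vi ∧ a + vi ≤ M by omega) h1
        · exact Or.inl h
    · constructor
      · intro h; exact Or.inl h
      · rintro (h | ⟨-, h | h⟩)
        · exact h
        · exact absurd (show (0:Int) ≤ a + vi ∧ a + vi ≤ M by omega) h1
        · exact absurd (show (0:Int) ≤ a - vi ∧ a - vi ≤ M by omega) h2

lemma frun_getD (M vi : Int) (pre : List Bool) :
    ∀ (k : Nat) (a : Int) (row : List Bool), 0 ≤ a → a + k = M + 1 →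
      row.length = (M + 1).toNat → ∀ w : Nat, w < (M + 1).toNat →
      (((PySem.List.pyRange a (M + 1) 1).foldl (fbody M vi pre) row).getD w false = true
        ↔ (row.getD w false = true ∨ ∃ j : Int, a ≤ j ∧ j ≤ M ∧
            PySem.List.pyGetD pre j false = true ∧ ((w : Int) = j + vi ∨ (w : Int) = j - vi))) := by
  intro k
  induction k with
  | zero =>
      intro a row ha hk hrow w hw
      rw [PySem.List.pyRange_one_eq_nil (by omega)]
      simp only [List.foldl_nil]
      constructor
      · intro h; exact Or.inl h
      · rintro (h | ⟨j, hj1, hj2, -, -⟩)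
        · exact h
        · omega
  | succ k ih =>
      intro a row ha hk hrow w hw
      rw [PySem.List.pyRange_one_cons (by omega)]
      simp only [List.foldl_cons]
      rw [ih (a + 1) _ (by omega) (by omega) (by rw [fbody_length]; exact hrow) w hw,
        fbody_getD M vi a pre row hrow w hw]
      constructor
      · rintro ((h | ⟨hpre', hcase⟩) | ⟨j, h1, h2, h3, h4⟩)
        · exact Or.inl h
        · exact Or.inr ⟨a, le_refl a, by omega, hpre', hcase⟩
        · exact Or.inr ⟨j, by omega, h2, h3, h4⟩
      · rintro (h | ⟨j, h1, h2, h3, h4⟩)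
        · exact Or.inl (Or.inl h)
        · rcases eq_or_lt_of_le h1 with rfl | hj
          · exact Or.inl (Or.inr ⟨h3, h4⟩)
          · exact Or.inr ⟨j, by omega, h2, h3, h4⟩

lemma fstep_length (M vi : Int) (pre : List Bool) :
    (fstep M vi pre).length = (M + 1).toNat := by
  unfold fstep; rw [frun_length]; simp

lemma fstep_getD (M vi : Int) (pre : List Bool) (hM : 0 ≤ M) (w : Nat) (hw : w < (M + 1).toNat) :
    ((fstep M vi pre).getD w false = true
      ↔ ∃ j : Int, 0 ≤ j ∧ j ≤ M ∧ PySem.List.pyGetD pre j false = true ∧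
          ((w : Int) = j + vi ∨ (w : Int) = j - vi)) := by
  unfold fstep
  rw [frun_getD M vi pre (M + 1).toNat 0 _ (by omega) (by omega) (by simp) w hw]
  rw [List.getD_replicate false hw]
  simp

lemma bestf_ge (M vi : Int) (f : List Int) (v : Int) : -1 ≤ bestf M vi f v := by
  unfold bestf
  split_ifs <;> simp_all <;> omega

lemma gstep_length (M vi : Int) (f : List Int) : (gstep M vi f).length = (M + 1).toNat := by
  unfold gstep; simp [PySem.List.length_pyRange_one]

lemma gstep_mem (M vi : Int) (f : List Int) (x : Int) (hx : x ∈ gstep M vi f) : -1 ≤ x := by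
  unfold gstep at hx
  obtain ⟨v, -, rfl⟩ := List.mem_map.1 hx
  exact bestf_ge M vi f v

lemma gstep_getD (M vi : Int) (f : List Int) (v : Nat) (hv : v < (M + 1).toNat) :
    (gstep M vi f).getD v (-1) = bestf M vi f (v : Int) := by
  unfold gstep
  rw [List.getD_eq_getElem _ _ (by simpa [PySem.List.length_pyRange_one] using hv)]
  rw [List.getElem_map]
  rw [PySem.List.getElem_pyRange_one]
  simp

-- generic facts about maxOver
lemma maxOver_fold_ge (P : List Bool) (F : List Int) :
    ∀ (l : List Nat) (a : Int),
      a ≤ l.foldl (fun a v => if P.getD v false = true then max a (F.getD v (-1)) else a) a := by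
  intro l
  induction l with
  | nil => intro a; exact le_refl a
  | cons x l ih =>
      intro a
      simp only [List.foldl_cons]
      refine le_trans ?_ (ih _)
      split
      · exact le_max_left _ _
      · exact le_refl a

lemma maxOver_ge (P : List Bool) (F : List Int) : -1 ≤ maxOver P F :=
  maxOver_fold_ge P F _ _

lemma maxOver_fold_le (P : List Bool) (F : List Int) {v : Nat} (hP : P.getD v false = true) :
    ∀ (l : List Nat) (a : Int), v ∈ l →
      F.getD v (-1) ≤ l.foldl (fun a v => if P.getD v false = true then max a (F.getD v (-1)) else a) a := by
  intro l
  induction l with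
  | nil => intro a h; cases h
  | cons x l ih =>
      intro a h
      simp only [List.foldl_cons]
      rcases List.mem_cons.1 h with rfl | h
      · refine le_trans ?_ (maxOver_fold_ge P F l _)
        simp only [hP, if_true]
        exact le_max_right _ _
      · exact ih _ h

lemma le_maxOver (P : List Bool) (F : List Int) {v : Nat} (hv : v < P.length)
    (hP : P.getD v false = true) : F.getD v (-1) ≤ maxOver P F :=
  maxOver_fold_le P F hP _ _ (List.mem_range.2 hv)

lemma maxOver_fold_attain (P : List Bool) (F : List Int) :
    ∀ (l : List Nat) (a : Int),
      l.foldl (fun a v => if P.getD v false = true then max a (F.getD v (-1)) else a) a = a ∨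
      ∃ v ∈ l, P.getD v false = true ∧
        l.foldl (fun a v => if P.getD v false = true then max a (F.getD v (-1)) else a) a = F.getD v (-1) := by
  intro l
  induction l with
  | nil => intro a; exact Or.inl rfl
  | cons x l ih =>
      intro a
      simp only [List.foldl_cons]
      by_cases hx : P.getD x false = true
      · rcases ih (if P.getD x false = true then max a (F.getD x (-1)) else a) with h | ⟨v, hv, hPv, h⟩
        · rw [h]
          simp only [hx, if_true]
          rcases max_choice a (F.getD x (-1)) with hm | hm
          · exact Or.inl hm
          · exact Or.inr ⟨x, List.mem_cons_self, hx, hm⟩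
        · exact Or.inr ⟨v, List.mem_cons_of_mem _ hv, hPv, h⟩
      · rcases ih (if P.getD x false = true then max a (F.getD x (-1)) else a) with h | ⟨v, hv, hPv, h⟩
        · rw [h]; simp only [hx]; exact Or.inl rfl
        · exact Or.inr ⟨v, List.mem_cons_of_mem _ hv, hPv, h⟩

lemma maxOver_attain (P : List Bool) (F : List Int) :
    maxOver P F = -1 ∨ ∃ v, v < P.length ∧ P.getD v false = true ∧ maxOver P F = F.getD v (-1) := by
  rcases maxOver_fold_attain P F (List.range P.length) (-1) with h | ⟨v, hv, hPv, h⟩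
  · exact Or.inl h
  · exact Or.inr ⟨v, List.mem_range.1 hv, hPv, h⟩

-- the descending find? characterised: its result is the greatest index in [0, a] where P holds, else -1
def FindSpec (P : List Bool) (a r : Int) : Prop :=
  (r = -1 ∧ ∀ i : Int, 0 ≤ i → i ≤ a → PySem.List.pyGetD P i false = false) ∨
  (0 ≤ r ∧ r ≤ a ∧ PySem.List.pyGetD P r false = true ∧
    ∀ i : Int, r < i → i ≤ a → PySem.List.pyGetD P i false = false)

lemma findDesc_char (P : List Bool) :
    ∀ (k : Nat) (a : Int), a + 1 = k → -1 ≤ a →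
      FindSpec P a (((PySem.List.pyRange a (-1) (-1)).find? (fun i => PySem.List.pyGetD P i false)).getD (-1)) := by
  intro k
  induction k with
  | zero =>
      intro a hk ha
      rw [PySem.List.pyRange_neg_one_eq_nil (by omega)]
      exact Or.inl ⟨rfl, fun i h1 h2 => by omega⟩
  | succ k ih =>
      intro a hk ha
      rw [PySem.List.pyRange_neg_one_cons (by omega : (-1 : Int) < a)]
      by_cases hpa : PySem.List.pyGetD P a false = true
      · rw [List.find?_cons_of_pos (p := fun i => PySem.List.pyGetD P i false) hpa]
        simp only [Option.getD_some]
        exact Or.inr ⟨by omega, le_refl a, hpa, fun i h1 h2 => by omega⟩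
      · rw [List.find?_cons_of_neg (p := fun i => PySem.List.pyGetD P i false) hpa]
        have hpa' : PySem.List.pyGetD P a false = false := by
          cases h : PySem.List.pyGetD P a false
          · rfl
          · exact absurd h hpa
        have hext : ∀ i : Int, i ≤ a → (i ≤ a - 1 → PySem.List.pyGetD P i false = false) →
            PySem.List.pyGetD P i false = false := by
          intro i h1 h2
          rcases eq_or_lt_of_le h1 with rfl | h
          · exact hpa'
          · exact h2 (by omega)
        rcases ih (a - 1) (by omega) (by omega) with ⟨h1, h2⟩ | ⟨h1, h2, h3, h4⟩
        · exact Or.inl ⟨h1, fun i hi1 hi2 => hext i hi2 (fun hle => h2 i hi1 hle)⟩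
        · exact Or.inr ⟨h1, by omega, h3, fun i hi1 hi2 => hext i hi2 (fun hle => h4 i hi1 hle)⟩

lemma range_getD (M : Int) (v : Nat) (hv : v < (M + 1).toNat) :
    (PySem.List.pyRange 0 (M + 1) 1).getD v (-1) = (v : Int) := by
  rw [List.getD_eq_getElem _ _ (by simpa [PySem.List.length_pyRange_one] using hv),
    PySem.List.getElem_pyRange_one]
  simp

lemma pyGetD_toNat (P : List Bool) (j : Int) (h0 : 0 ≤ j) (hlen : j < (P.length : Int)) :
    PySem.List.pyGetD P j false = P.getD j.toNat false := by
  rw [PySem.List.pyGetD_eq_getElem P false h0 hlen, List.getD_eq_getElem _ _ (by omega)]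

lemma scan_eq_maxOver_range (M : Int) (hM : 0 ≤ M) (P : List Bool)
    (hP : P.length = (M + 1).toNat) :
    scanDesc M P = maxOver P (PySem.List.pyRange 0 (M + 1) 1) := by
  have hchar := findDesc_char P (M + 1).toNat M (by omega) (by omega)
  unfold scanDesc
  unfold FindSpec at hchar
  set r := ((PySem.List.pyRange M (-1) (-1)).find? (fun i => PySem.List.pyGetD P i false)).getD (-1) with hrdef
  rcases hchar with ⟨hr, hall⟩ | ⟨hr0, hrM, hPr, hmax⟩ <;>
    rcases maxOver_attain P (PySem.List.pyRange 0 (M + 1) 1) with hG | ⟨v, hv, hPv, hG⟩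
  · rw [hr, hG]
  · exfalso
    have := hall (v : Int) (by omega) (by omega)
    rw [pyGetD_toNat P (v : Int) (by omega) (by omega)] at this
    simp only [Int.toNat_natCast] at this
    rw [hPv] at this
    exact absurd this (by simp)
  · exfalso
    have hPv : P.getD r.toNat false = true := by
      rw [← pyGetD_toNat P r hr0 (by omega)]
      exact hPr
    have := le_maxOver P (PySem.List.pyRange 0 (M + 1) 1) (v := r.toNat) (by omega) hPv
    rw [range_getD M r.toNat (by omega), hG] at this
    omega
  · have hPv' : P.getD r.toNat false = true := by
      rw [← pyGetD_toNat P r hr0 (by omega)]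
      exact hPr
    have hle : r ≤ (v : Int) := by
      have := le_maxOver P (PySem.List.pyRange 0 (M + 1) 1) (v := r.toNat) (by omega) hPv'
      rw [range_getD M r.toNat (by omega), hG, range_getD M v (by omega)] at this
      omega
    have hge : (v : Int) ≤ r := by
      by_contra hc
      have := hmax (v : Int) (by omega) (by omega)
      rw [pyGetD_toNat P (v : Int) (by omega) (by omega)] at this
      simp only [Int.toNat_natCast] at this
      rw [hPv] at this
      exact absurd this (by simp)
    rw [hG, range_getD M v (by omega)]
    omega

-- one forward step of A matches one backward step of B under maxOver
lemma bestf_le_of (M vi : Int) (f : List Int) (v c : Int)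
    (h3 : -1 ≤ c)
    (h1 : (0 ≤ v + vi ∧ v + vi ≤ M) → PySem.List.pyGetD f (v + vi) 0 ≤ c)
    (h2 : (0 ≤ v - vi ∧ v - vi ≤ M) → PySem.List.pyGetD f (v - vi) 0 ≤ c) :
    bestf M vi f v ≤ c := by
  unfold bestf
  by_cases hu : 0 ≤ v + vi ∧ v + vi ≤ M
  · have hu' := h1 hu
    by_cases hd : 0 ≤ v - vi ∧ v - vi ≤ M
    · have hd' := h2 hd
      split_ifs <;> omega
    · split_ifs <;> omega
  · by_cases hd : 0 ≤ v - vi ∧ v - vi ≤ M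
    · have hd' := h2 hd
      split_ifs <;> omega
    · split_ifs <;> omega

lemma le_bestf_up (M vi : Int) (f : List Int) (v : Int) (h : 0 ≤ v + vi ∧ v + vi ≤ M) :
    PySem.List.pyGetD f (v + vi) 0 ≤ bestf M vi f v := by
  unfold bestf
  split_ifs <;> omega

lemma le_bestf_down (M vi : Int) (f : List Int) (v : Int) (h : 0 ≤ v - vi ∧ v - vi ≤ M) :
    PySem.List.pyGetD f (v - vi) 0 ≤ bestf M vi f v := by
  unfold bestf
  split_ifs <;> omega

lemma step_commute (M vi : Int) (hM : 0 ≤ M) (P : List Bool) (f : List Int)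
    (hP : P.length = (M + 1).toNat) (hf : f.length = (M + 1).toNat)
    (hmem : ∀ x ∈ f, -1 ≤ x) :
    maxOver P (gstep M vi f) = maxOver (fstep M vi P) f := by
  have hconv : ∀ t : Int, 0 ≤ t → t ≤ M → PySem.List.pyGetD f t 0 = f.getD t.toNat (-1) := by
    intro t h0 ht
    rw [PySem.List.pyGetD_eq_getElem f 0 h0 (by omega), List.getD_eq_getElem _ _ (by omega)]
  have hfm : ∀ t : Int, 0 ≤ t → t ≤ M → -1 ≤ PySem.List.pyGetD f t 0 := by
    intro t h0 ht
    rw [PySem.List.pyGetD_eq_getElem f 0 h0 (by omega)]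
    exact hmem _ (List.getElem_mem _)
  have hbranch : ∀ t : Int, 0 ≤ t → t ≤ M → (fstep M vi P).getD t.toNat false = true →
      PySem.List.pyGetD f t 0 ≤ maxOver (fstep M vi P) f := by
    intro t h0 ht hstep
    rw [hconv t h0 ht]
    exact le_maxOver _ _ (by rw [fstep_length]; omega) hstep
  apply le_antisymm
  · rcases maxOver_attain P (gstep M vi f) with h | ⟨v, hv, hPv, h⟩
    · rw [h]; exact maxOver_ge _ _
    · rw [hP] at hv
      rw [h, gstep_getD M vi f v hv]
      have hPv' : PySem.List.pyGetD P (v : Int) false = true := by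
        rw [pyGetD_toNat P (v : Int) (by omega) (by omega)]
        simpa using hPv
      refine bestf_le_of M vi f (v : Int) _ (maxOver_ge _ _) (fun hc => ?_) (fun hc => ?_)
      · exact hbranch _ hc.1 hc.2
          ((fstep_getD M vi P hM _ (by omega)).2
            ⟨(v : Int), by omega, by omega, hPv', Or.inl (by omega)⟩)
      · exact hbranch _ hc.1 hc.2
          ((fstep_getD M vi P hM _ (by omega)).2
            ⟨(v : Int), by omega, by omega, hPv', Or.inr (by omega)⟩)
  · rcases maxOver_attain (fstep M vi P) f with h | ⟨w, hw, hPw, h⟩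
    · rw [h]; exact maxOver_ge _ _
    · rw [fstep_length] at hw
      obtain ⟨j, hj0, hjM, hprej, hcase⟩ := (fstep_getD M vi P hM w hw).1 hPw
      have hfw : f.getD w (-1) ≤ bestf M vi f j := by
        rcases hcase with hwj | hwj
        · have hval : PySem.List.pyGetD f (j + vi) 0 = f.getD w (-1) := by
            rw [hconv (j + vi) (by omega) (by omega)]
            congr 1
            omega
          rw [← hval]
          exact le_bestf_up M vi f j ⟨by omega, by omega⟩
        · have hval : PySem.List.pyGetD f (j - vi) 0 = f.getD w (-1) := by
            rw [hconv (j - vi) (by omega) (by omega)]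
            congr 1
            omega
          rw [← hval]
          exact le_bestf_down M vi f j ⟨by omega, by omega⟩
      have hPj : P.getD j.toNat false = true := by
        rw [← pyGetD_toNat P j hj0 (by omega)]
        exact hprej
      have hlast : bestf M vi f j ≤ maxOver P (gstep M vi f) := by
        have := le_maxOver P (gstep M vi f) (v := j.toNat) (by omega) hPj
        rw [gstep_getD M vi f j.toNat (by omega)] at this
        rw [show ((j.toNat : Nat) : Int) = j by omega] at this
        exact this
      rw [h]
      exact le_trans hfw hlast

lemma bfold_length (M : Int) (L : List Int) :
    (L.foldr (fun vi f => gstep M vi f) (PySem.List.pyRange 0 (M + 1) 1)).length = (M + 1).toNat := by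
  cases L with
  | nil => simp [PySem.List.length_pyRange_one]
  | cons v l => simp [List.foldr_cons, gstep_length]

lemma bfold_mem (M : Int) (L : List Int) (x : Int)
    (hx : x ∈ L.foldr (fun vi f => gstep M vi f) (PySem.List.pyRange 0 (M + 1) 1)) : -1 ≤ x := by
  cases L with
  | nil =>
      simp only [List.foldr_nil] at hx
      have := (PySem.List.mem_pyRange_one.1 hx).1; omega
  | cons v l => exact gstep_mem _ _ _ _ (by simpa using hx)

-- the central duality: A's scan of the forward fold equals B's backward fold read through maxOver
lemma duality (M : Int) (hM : 0 ≤ M) :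
    ∀ (L : List Int) (P : List Bool), P.length = (M + 1).toNat →
      scanDesc M (L.foldl (fun p vi => fstep M vi p) P)
        = maxOver P (L.foldr (fun vi f => gstep M vi f) (PySem.List.pyRange 0 (M + 1) 1)) := by
  intro L
  induction L with
  | nil => intro P hP; simpa using scan_eq_maxOver_range M hM P hP
  | cons v l ih =>
      intro P hP
      simp only [List.foldl_cons, List.foldr_cons]
      rw [ih (fstep M v P) (fstep_length M v P),
        step_commute M v hM P _ hP (bfold_length M l) (fun x hx => bfold_mem M l x hx)]

-- A's dp-table bookkeeping: the fold's pre_result is a clean fold of fstep, and dp[-1] holds it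
lemma dpfold_shape (M N : Int) (V : List Int) :
    ∀ (k : Nat) (dpdone : List (List Bool)) (pre : List Bool),
      (dpdone.length : Int) + k = N →
      ∃ chain : List (List Bool),
        (PySem.List.pyRange (dpdone.length : Int) N 1).foldl (stepA M V)
            (dpdone ++ List.replicate k (List.replicate (M + 1).toNat false), pre)
          = (dpdone ++ chain,
             ((PySem.List.pyRange (dpdone.length : Int) N 1).map (fun i => PySem.List.pyGetD V i 0)).foldl
               (fun p vi => fstep M vi p) pre)
        ∧ chain.length = k
        ∧ (k ≠ 0 → chain.getLast? = some
            (((PySem.List.pyRange (dpdone.length : Int) N 1).map (fun i => PySem.List.pyGetD V i 0)).foldl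
              (fun p vi => fstep M vi p) pre)) := by
  intro k
  induction k with
  | zero =>
      intro dpdone pre hk
      rw [PySem.List.pyRange_one_eq_nil (by omega)]
      exact ⟨[], by simp, rfl, fun h => absurd rfl h⟩
  | succ k ih =>
      intro dpdone pre hk
      rw [PySem.List.pyRange_one_cons (by omega : (dpdone.length : Int) < N)]
      simp only [List.foldl_cons, List.map_cons]
      have hget : PySem.List.pyGetD (dpdone ++ List.replicate (k + 1) (List.replicate (M + 1).toNat false))
          (dpdone.length : Int) [] = List.replicate (M + 1).toNat false := by
        rw [PySem.List.pyGetD_natCast, List.getD_eq_getElem?_getD,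
          List.getElem?_append_right (le_refl _)]
        simp
      have hsetA : stepA M V (dpdone ++ List.replicate (k + 1) (List.replicate (M + 1).toNat false), pre)
          (dpdone.length : Int)
          = ((dpdone ++ [fstep M (PySem.List.pyGetD V (dpdone.length : Int) 0) pre]) ++
              List.replicate k (List.replicate (M + 1).toNat false),
             fstep M (PySem.List.pyGetD V (dpdone.length : Int) 0) pre) := by
        unfold stepA
        dsimp only
        rw [hget]
        have hrow : (PySem.List.pyRange 0 (M + 1) 1).foldl
            (fbody M (PySem.List.pyGetD V (dpdone.length : Int) 0) pre)
            (List.replicate (M + 1).toNat false)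
            = fstep M (PySem.List.pyGetD V (dpdone.length : Int) 0) pre := rfl
        rw [hrow, PySem.List.pySetD_natCast, List.set_append, if_neg (by omega)]
        simp [List.replicate_succ]
      rw [hsetA]
      have hlen' : (((dpdone ++ [fstep M (PySem.List.pyGetD V (dpdone.length : Int) 0) pre]).length : Nat) : Int) + (k : Int) = N := by
        simp only [List.length_append, List.length_cons, List.length_nil]
        push_cast
        omega
      obtain ⟨chain, heq, hclen, hlast⟩ :=
        ih (dpdone ++ [fstep M (PySem.List.pyGetD V (dpdone.length : Int) 0) pre])
           (fstep M (PySem.List.pyGetD V (dpdone.length : Int) 0) pre) hlen'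
      have hcast : (((dpdone ++ [fstep M (PySem.List.pyGetD V (dpdone.length : Int) 0) pre]).length : Nat) : Int)
          = (dpdone.length : Int) + 1 := by
        simp only [List.length_append, List.length_cons, List.length_nil]
        push_cast
        omega
      rw [hcast] at heq hlast
      refine ⟨fstep M (PySem.List.pyGetD V (dpdone.length : Int) 0) pre :: chain, ?_, by simp [hclen], ?_⟩
      · rw [heq]
        simp
      · intro _
        rcases Nat.eq_zero_or_pos k with rfl | hkpos
        · have hnil : PySem.List.pyRange ((dpdone.length : Int) + 1) N 1 = [] :=
            PySem.List.pyRange_one_eq_nil (by omega)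
          have : chain = [] := List.eq_nil_of_length_eq_zero hclen
          subst this
          rw [hnil]
          simp
        · have hne : chain ≠ [] := by
            intro hc
            rw [hc] at hclen
            simp at hclen
            omega
          rw [show (fstep M (PySem.List.pyGetD V (dpdone.length : Int) 0) pre :: chain)
              = [fstep M (PySem.List.pyGetD V (dpdone.length : Int) 0) pre] ++ chain from rfl,
            List.getLast?_append_of_ne_nil _ hne]
          exact hlast (by omega)

lemma solution_eq (N S M : Int) (V : List Int) (hN : 1 ≤ N) :
    solution N S M V
      = scanDesc M (((PySem.List.pyRange 0 N 1).map (fun i => PySem.List.pyGetD V i 0)).foldl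
          (fun p vi => fstep M vi p)
          (PySem.List.pySetD (List.replicate (M + 1).toNat false) S true)) := by
  obtain ⟨chain, heq, hlen, hlast⟩ :=
    dpfold_shape M N V N.toNat [] (PySem.List.pySetD (List.replicate (M + 1).toNat false) S true)
      (by simp only [List.length_nil, Nat.cast_zero]; omega)
  simp only [List.length_nil, Nat.cast_zero, List.nil_append] at heq hlast
  have hne : chain ≠ [] := by
    intro hc
    rw [hc] at hlen
    simp at hlen
    omega
  show scanDesc M (PySem.List.pyGetD
      (((PySem.List.pyRange 0 N 1).foldl (stepA M V)
        ((PySem.List.pyRange 0 N 1).map (fun _ => List.replicate (M + 1).toNat false),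
         PySem.List.pySetD (List.replicate (M + 1).toNat false) S true)).1) (-1) []) = _
  rw [show ((PySem.List.pyRange 0 N 1).map (fun _ => List.replicate (M + 1).toNat false))
      = List.replicate N.toNat (List.replicate (M + 1).toNat false) by
    rw [List.map_const', PySem.List.length_pyRange_one]
    congr 1
    omega]
  rw [heq]
  simp only []
  rw [PySem.List.pyGetD_neg_one chain [] hne]
  have := hlast (by omega)
  rw [List.getLast?_eq_some_getLast hne] at this
  rw [Option.some_inj.1 this]

lemma pyRange_desc_eq_reverse (N : Int) (hN : 0 ≤ N) :
    PySem.List.pyRange (N - 1) (-1) (-1) = (PySem.List.pyRange 0 N 1).reverse := by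
  rw [PySem.List.pyRange_neg_one]
  apply List.ext_getElem
  · simp [PySem.List.length_pyRange_one]
  · intro k h1 h2
    rw [List.getElem_map, List.getElem_reverse, PySem.List.getElem_pyRange_one]
    simp only [List.length_map, List.length_range] at h1
    simp only [PySem.List.length_pyRange_one] at h2 ⊢
    rw [List.getElem_range]
    omega

lemma solution_alt_eq (N S M : Int) (V : List Int) (hN : 0 ≤ N) :
    solution_alt N S M V
      = PySem.List.pyGetD
          (((PySem.List.pyRange 0 N 1).map (fun i => PySem.List.pyGetD V i 0)).foldr
            (fun vi f => gstep M vi f) (PySem.List.pyRange 0 (M + 1) 1)) S (-1) := by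
  show PySem.List.pyGetD _ S (-1) = _
  congr 1
  rw [List.foldr_map]
  have hbody : ∀ (f : List Int) (i : Int),
      (PySem.List.pyRange 0 (M + 1) 1).foldl (fun g v =>
          let best : Int := -1
          let best := if 0 ≤ v + PySem.List.pyGetD V i 0 ∧ v + PySem.List.pyGetD V i 0 ≤ M ∧ best < PySem.List.pyGetD f (v + PySem.List.pyGetD V i 0) 0 then PySem.List.pyGetD f (v + PySem.List.pyGetD V i 0) 0 else best
          let best := if 0 ≤ v - PySem.List.pyGetD V i 0 ∧ v - PySem.List.pyGetD V i 0 ≤ M ∧ best < PySem.List.pyGetD f (v - PySem.List.pyGetD V i 0) 0 then PySem.List.pyGetD f (v - PySem.List.pyGetD V i 0) 0 else best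
          g ++ [best]) []
        = gstep M (PySem.List.pyGetD V i 0) f := by
    intro f i
    rw [show (fun (g : List Int) (v : Int) =>
          let best : Int := -1
          let best := if 0 ≤ v + PySem.List.pyGetD V i 0 ∧ v + PySem.List.pyGetD V i 0 ≤ M ∧ best < PySem.List.pyGetD f (v + PySem.List.pyGetD V i 0) 0 then PySem.List.pyGetD f (v + PySem.List.pyGetD V i 0) 0 else best
          let best := if 0 ≤ v - PySem.List.pyGetD V i 0 ∧ v - PySem.List.pyGetD V i 0 ≤ M ∧ best < PySem.List.pyGetD f (v - PySem.List.pyGetD V i 0) 0 then PySem.List.pyGetD f (v - PySem.List.pyGetD V i 0) 0 else best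
          g ++ [best])
        = (fun g v => g ++ [bestf M (PySem.List.pyGetD V i 0) f v]) from rfl,
      PySem.List.foldl_append_singleton_eq_map]
    rfl
  calc (PySem.List.pyRange (N - 1) (-1) (-1)).foldl _ (PySem.List.pyRange 0 (M + 1) 1)
      = (PySem.List.pyRange (N - 1) (-1) (-1)).foldl
          (fun f i => gstep M (PySem.List.pyGetD V i 0) f) (PySem.List.pyRange 0 (M + 1) 1) := by
        apply PySem.List.foldl_congr_mem
        intro acc x _
        exact hbody acc x
    _ = _ := by
        rw [pyRange_desc_eq_reverse N hN, List.foldl_reverse]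

-- the start row is a one-hot vector; maxOver of a one-hot vector reads one entry
lemma onehot_getD_self (m idx : Nat) (h : idx < m) :
    ((List.replicate m false).set idx true).getD idx false = true := by
  rw [List.getD_eq_getElem _ _ (by simpa using h)]; simp

lemma onehot_getD_ne (m idx v : Nat) (h : v ≠ idx) :
    ((List.replicate m false).set idx true).getD v false = false := by
  rcases Nat.lt_or_ge v m with hv | hv
  · rw [List.getD_eq_getElem _ _ (by simpa using hv)]
    rw [List.getElem_set_ne (by omega)]
    simp
  · exact List.getD_eq_default _ _ (by simpa using hv)

lemma maxOver_onehot (m : Nat) (idx : Nat) (hidx : idx < m) (F : List Int)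
    (hF : F.length = m) (hmem : ∀ x ∈ F, -1 ≤ x) :
    maxOver ((List.replicate m false).set idx true) F = F.getD idx (-1) := by
  have hlenP : ((List.replicate m false).set idx true).length = m := by simp
  have hFidx : -1 ≤ F.getD idx (-1) := by
    have : F.getD idx (-1) ∈ F := by
      rw [List.getD_eq_getElem _ _ (by omega)]
      exact List.getElem_mem _
    exact hmem _ this
  have hle : F.getD idx (-1) ≤ maxOver ((List.replicate m false).set idx true) F :=
    le_maxOver _ _ (by omega) (onehot_getD_self m idx hidx)
  rcases maxOver_attain ((List.replicate m false).set idx true) F with h | ⟨v, hv, hPv, h⟩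
  · omega
  · have : v = idx := by
      by_contra hne
      rw [onehot_getD_ne m idx v hne] at hPv
      exact absurd hPv (by simp)
    rw [h, this]

lemma pre0_set (S M : Int) (hlo : -(M + 1) ≤ S) (hhi : S ≤ M) :
    PySem.List.pySetD (List.replicate (M + 1).toNat false) S true
      = (List.replicate (M + 1).toNat false).set (if 0 ≤ S then S.toNat else (S + M + 1).toNat) true := by
  by_cases h0 : 0 ≤ S
  · rw [PySem.List.pySetD_of_nonneg _ _ h0, if_pos h0]
  · unfold PySem.List.pySetD PySem.List.pySet? PySem.List.pyIdx?
    rw [if_neg h0, if_pos (by simp only [List.length_replicate]; omega : -((List.replicate (M + 1).toNat (false : Bool)).length : Int) ≤ S)]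
    simp only [Option.map_some, Option.getD_some, List.length_replicate]
    rw [if_neg h0]
    congr 1
    omega

lemma final_read (S M : Int) (hlo : -(M + 1) ≤ S) (hhi : S ≤ M) (F : List Int)
    (hF : F.length = (M + 1).toNat) :
    PySem.List.pyGetD F S (-1) = F.getD (if 0 ≤ S then S.toNat else (S + M + 1).toNat) (-1) := by
  by_cases h0 : 0 ≤ S
  · rw [PySem.List.pyGetD_eq_getElem F _ h0 (by omega), if_pos h0,
      List.getD_eq_getElem _ _ (by omega)]
  · have hS : S = -(((-S).toNat : Nat) : Int) := by omega
    rw [hS, PySem.List.pyGetD_neg_natCast F _ _ (by omega) (by omega), if_neg (by omega),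
      List.getD_eq_getElem _ _ (by omega)]
    congr 1
    omega

-- ===== VERDICT (by name: the statement is the Claim_ definition above) =====
theorem solution_spec : Claim_equal_solution := by
  intro N S M V _ hPre
  obtain ⟨hN, hV, hlo, hhi⟩ := hPre
  have hM : 0 ≤ M := by omega
  unfold Spec_solution
  have hidx : (if 0 ≤ S then S.toNat else (S + M + 1).toNat) < (M + 1).toNat := by
    split <;> omega
  rw [solution_eq N S M V hN, solution_alt_eq N S M V (by omega), pre0_set S M hlo hhi,
    duality M hM _ _ (by simp),
    final_read S M hlo hhi _ (bfold_length M _),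
    maxOver_onehot (M + 1).toNat _ hidx _ (bfold_length M _) (fun x hx => bfold_mem M _ x hx)]
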